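-- pv_equiv track=rewrite | github.com/gabrielcoelhodacunha-old/upm-programming-marathon-training | 3-Master_Yoda/05-1251-tell_me_the_frequencies/main.py | get_sorted_frequencies_by_frequency
-- ===== SOURCE A (Python) =====
-- def get_sorted_frequencies_by_frequency(frequencies):
--   sorted_frequencies = dict()
--   for ascii_code, frequency in frequencies.items():
--     if frequency in sorted_frequencies.keys():
--       sorted_frequencies[frequency].append(ascii_code)
--     else:
--       sorted_frequencies[frequency] = [ascii_code]
--   return sorted(sorted_frequencies.items(), key=lambda item: item[0])
-- ===== SOURCE B (Python) =====
-- def get_sorted_frequencies_by_frequency(frequencies):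
--   items = sorted(frequencies.items(), key=lambda kv: kv[1])
--   result = []
--   for ascii_code, frequency in items:
--     if result and result[-1][0] == frequency:
--       result[-1][1].append(ascii_code)
--     else:
--       result.append((frequency, [ascii_code]))
--   return result
-- ===== Notes on version B (the rewrite author's own statement) =====
-- stated objective: alternative
-- what changed: Instead of grouping codes into a dict keyed by frequency and then sorting the dict items, B stably sorts the (code, frequency) items by frequency once and builds the groups in a single consecutive-grouping pass over the sorted list.
import Mathlib
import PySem

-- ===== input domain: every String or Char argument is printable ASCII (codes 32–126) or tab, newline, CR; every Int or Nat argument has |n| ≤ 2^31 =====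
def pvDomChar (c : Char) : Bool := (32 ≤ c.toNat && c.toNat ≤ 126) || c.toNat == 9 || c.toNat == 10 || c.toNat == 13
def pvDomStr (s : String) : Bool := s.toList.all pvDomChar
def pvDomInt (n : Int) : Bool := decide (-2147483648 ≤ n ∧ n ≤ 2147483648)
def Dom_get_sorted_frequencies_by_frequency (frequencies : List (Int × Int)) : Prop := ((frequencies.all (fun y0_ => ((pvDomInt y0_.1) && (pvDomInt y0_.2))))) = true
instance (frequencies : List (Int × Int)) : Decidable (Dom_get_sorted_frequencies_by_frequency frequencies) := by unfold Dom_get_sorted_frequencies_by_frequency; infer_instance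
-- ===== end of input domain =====

-- B replaces A's group-into-dict-then-sort by a stable sort by frequency followed by one consecutive-grouping pass (alternative decomposition, same result).


-- ===== PORT A =====
-- literal port of A: build a dict frequency -> list of ascii codes, then sort its items by frequency
def get_sorted_frequencies_by_frequency (frequencies : List (Int × Int)) : List (Int × List Int) :=
  let g := (PySem.Dict.ofList frequencies).items.foldl
    (fun d p =>
      if d.contains p.2 then d.insert p.2 (d.getD p.2 [] ++ [p.1])
      else d.insert p.2 [p.1])
    PySem.Dict.empty
  PySem.List.sorted g.items (fun it => it.1)

-- ===== PORT B =====
-- literal port of B: stable-sort the items by frequency, then group equal consecutive frequencies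
def get_sorted_frequencies_by_frequency_alt (frequencies : List (Int × Int)) : List (Int × List Int) :=
  let ss := PySem.List.sorted (PySem.Dict.ofList frequencies).items (fun kv => kv.2)
  ss.foldl
    (fun acc p =>
      match acc.getLast? with
      | some lastg =>
          if lastg.1 == p.2 then acc.dropLast ++ [(lastg.1, lastg.2 ++ [p.1])]
          else acc ++ [(p.2, [p.1])]
      | none => [(p.2, [p.1])])
    []

-- ===== PRECONDITION & SPEC =====
def Spec_get_sorted_frequencies_by_frequency (frequencies : List (Int × Int)) (out : List (Int × List Int)) : Prop := out = get_sorted_frequencies_by_frequency_alt frequencies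
instance (frequencies : List (Int × Int)) (out : List (Int × List Int)) : Decidable (Spec_get_sorted_frequencies_by_frequency frequencies out) := by unfold Spec_get_sorted_frequencies_by_frequency; infer_instance

-- ===== CLAIM (what is proved, stated in full; the proofs are below) =====
def Claim_equal_get_sorted_frequencies_by_frequency : Prop := ∀ (frequencies : List (Int × Int)), Dom_get_sorted_frequencies_by_frequency frequencies → Spec_get_sorted_frequencies_by_frequency frequencies (get_sorted_frequencies_by_frequency frequencies)


-- ===== LEMMAS AND PROOFS =====

-- the canonical group of frequency q drawn from an item list l
def pvCanon (l : List (Int × Int)) (q : Int) : Int × List Int :=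
  (q, (l.filter (fun p => p.2 == q)).map (fun p => p.1))

-- A's loop body is Dict.modify
theorem pvA_body_modify (d : PySem.Dict Int (List Int)) (p : Int × Int) :
    (if d.contains p.2 then d.insert p.2 (d.getD p.2 [] ++ [p.1]) else d.insert p.2 [p.1])
      = d.modify p.2 [] (fun v => v ++ [p.1]) := by
  by_cases h : d.contains p.2
  · simp [h, PySem.Dict.modify]
  · have h2 : ∀ q ∈ d.items, ¬((q.1 == p.2) = true) := by
      intro q hq hc
      exact h (by simp only [PySem.Dict.contains]; exact List.any_eq_true.mpr ⟨q, hq, hc⟩)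
    have h' : d.items.find? (fun q => q.1 == p.2) = none := List.find?_eq_none.mpr h2
    simp [h, PySem.Dict.modify, PySem.Dict.getD, PySem.Dict.get?, h']

-- A's grouping dict has the canonical items
theorem pvA_items (l : List (Int × Int)) :
    (l.foldl (fun d p =>
      if d.contains p.2 then d.insert p.2 (d.getD p.2 [] ++ [p.1])
      else d.insert p.2 [p.1]) PySem.Dict.empty).items
    = (PySem.Set.ofList (l.map (fun p => p.2))).map (pvCanon l) := by
  have hb : (l.foldl (fun d p =>
      if d.contains p.2 then d.insert p.2 (d.getD p.2 [] ++ [p.1])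
      else d.insert p.2 [p.1]) PySem.Dict.empty)
      = l.foldl (fun d p => d.modify p.2 [] (fun v => v ++ [p.1])) PySem.Dict.empty :=
    PySem.List.foldl_congr_mem l _ _ _ (fun acc x _ => pvA_body_modify acc x)
  have hswap : l.foldl (fun d p => d.modify p.2 [] (fun v => v ++ [p.1])) PySem.Dict.empty
      = (l.map Prod.swap).foldl (fun d p => d.modify p.1 [] (fun v => v ++ [p.2])) PySem.Dict.empty := by
    rw [List.foldl_map]; rfl
  rw [hb, hswap]
  have hkeys : ((l.map Prod.swap).foldl (fun d p => d.modify p.1 [] (fun v => v ++ [p.2]))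
      PySem.Dict.empty).keys = PySem.Set.ofList (l.map (fun p => p.2)) := by
    have := PySem.Dict.keys_foldl_modify_key (l.map Prod.swap) (fun p => p.1) []
      (fun _ p => (fun v => v ++ [p.2])) PySem.Dict.empty
    simpa [PySem.Dict.keys_empty, PySem.Set.update_empty, List.map_map, Function.comp] using this
  have hnd : ((l.map Prod.swap).foldl (fun d p => d.modify p.1 [] (fun v => v ++ [p.2]))
      PySem.Dict.empty).keys.Nodup :=
    PySem.Dict.nodup_keys_foldl_modify_key (l.map Prod.swap) (fun p => p.1) []
      (fun _ p => (fun v => v ++ [p.2])) PySem.Dict.empty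
      (by rw [PySem.Dict.keys_empty]; exact List.nodup_nil)
  have hgetD : ∀ c, ((l.map Prod.swap).foldl (fun d p => d.modify p.1 [] (fun v => v ++ [p.2]))
      PySem.Dict.empty).getD c [] = (l.filter (fun p => p.2 == c)).map (fun p => p.1) := by
    intro c
    have := PySem.Dict.getD_foldl_modify_append (l.map Prod.swap) PySem.Dict.empty c
    simpa [PySem.Dict.getD_empty, List.filter_map, List.map_map, Function.comp] using this
  rw [PySem.Dict.items_eq_map_keys _ hnd [], hkeys]
  exact List.map_congr_left (fun q _ => by simp [pvCanon, hgetD q])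

-- insertBy into a ≤-sorted list keeps it ≤-sorted (key = second component)
theorem pvInsertBy_pairwise (x : Int × Int) (l : List (Int × Int))
    (h : l.Pairwise (fun a b => a.2 ≤ b.2)) :
    (PySem.List.insertBy (fun a b => decide (a.2 < b.2)) x l).Pairwise (fun a b => a.2 ≤ b.2) := by
  induction l with
  | nil => simp [PySem.List.insertBy]
  | cons y ys ih =>
    rw [List.pairwise_cons] at h
    by_cases hlt : x.2 < y.2
    · rw [PySem.List.insertBy, if_pos (by simpa using hlt)]
      rw [List.pairwise_cons]
      constructor
      · intro z hz
        rcases List.mem_cons.mp hz with hz | hz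
        · exact le_of_lt (hz ▸ hlt)
        · exact le_of_lt (lt_of_lt_of_le hlt (h.1 z hz))
      · exact List.pairwise_cons.mpr h
    · rw [PySem.List.insertBy, if_neg (by simpa using hlt)]
      rw [List.pairwise_cons]
      refine ⟨?_, ih h.2⟩
      intro z hz
      rcases (PySem.List.mem_insertBy _ _ _ _).mp hz with hz | hz
      · exact hz ▸ le_of_not_gt hlt
      · exact h.1 z hz

-- insertBy into a ≤-sorted list appends x at the END of its own frequency class
theorem pvInsertBy_filter (x : Int × Int) (l : List (Int × Int)) (c : Int)
    (h : l.Pairwise (fun a b => a.2 ≤ b.2)) :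
    (PySem.List.insertBy (fun a b => decide (a.2 < b.2)) x l).filter (fun p => p.2 == c)
      = l.filter (fun p => p.2 == c) ++ (if x.2 == c then [x] else []) := by
  induction l with
  | nil => by_cases hx : x.2 == c <;> simp [PySem.List.insertBy, hx]
  | cons y ys ih =>
    rw [List.pairwise_cons] at h
    by_cases hlt : x.2 < y.2
    · rw [PySem.List.insertBy, if_pos (by simpa using hlt)]
      by_cases hx : x.2 = c
      · have hnil : (y :: ys).filter (fun p => p.2 == c) = [] := by
          rw [List.filter_eq_nil_iff]
          intro z hz
          have : y.2 ≤ z.2 := by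
            rcases List.mem_cons.mp hz with hz | hz
            · exact hz ▸ le_refl _
            · exact h.1 z hz
          have : c < z.2 := lt_of_lt_of_le (hx ▸ hlt) this
          simp [ne_of_gt this]
        simp [hx, hnil]
      · have hx' : (x.2 == c) = false := by simp [hx]
        simp [List.filter_cons, hx']
    · rw [PySem.List.insertBy, if_neg (by simpa using hlt)]
      rw [List.filter_cons, List.filter_cons, ih h.2]
      by_cases hy : y.2 == c <;> simp [hy]

-- stability of the insertion sort: per-frequency subsequences are preserved
theorem pvFoldl_ins_filter (l : List (Int × Int)) (acc : List (Int × Int)) (c : Int)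
    (h : acc.Pairwise (fun a b => a.2 ≤ b.2)) :
    (l.foldl (fun acc x => PySem.List.insertBy (fun a b => decide (a.2 < b.2)) x acc) acc).filter
        (fun p => p.2 == c)
      = acc.filter (fun p => p.2 == c) ++ l.filter (fun p => p.2 == c) := by
  induction l generalizing acc with
  | nil => simp
  | cons x t ih =>
    rw [List.foldl_cons, ih _ (pvInsertBy_pairwise x acc h), pvInsertBy_filter x acc c h,
      List.filter_cons]
    by_cases hx : x.2 == c <;> simp [hx]

theorem pvSorted_stable (l : List (Int × Int)) (c : Int) :
    (PySem.List.sorted l (fun kv => kv.2)).filter (fun p => p.2 == c)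
      = l.filter (fun p => p.2 == c) := by
  have hrw := PySem.List.sorted_eq_foldl_insertBy l (fun kv => kv.2)
  rw [hrw]
  simpa using pvFoldl_ins_filter l [] c List.Pairwise.nil

-- B's grouping loop on a ≤-sorted list produces the canonical groups
theorem pvGroup_loop (l : List (Int × Int)) (acc : List (Int × List Int)) (f : Int) (g : List Int)
    (hs : l.Pairwise (fun a b => a.2 ≤ b.2)) (hf : ∀ p ∈ l, f ≤ p.2) :
    l.foldl (fun acc p =>
      match acc.getLast? with
      | some lastg =>
          if lastg.1 == p.2 then acc.dropLast ++ [(lastg.1, lastg.2 ++ [p.1])]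
          else acc ++ [(p.2, [p.1])]
      | none => [(p.2, [p.1])]) (acc ++ [(f, g)])
    = acc ++ (f, g ++ (l.filter (fun p => p.2 == f)).map (fun p => p.1)) ::
        ((PySem.Set.ofList (l.map (fun p => p.2))).filter (fun q => !(q == f))).map (pvCanon l) := by
  induction l generalizing acc f g with
  | nil => simp [PySem.Set.ofList_nil]
  | cons p t ih =>
    rw [List.pairwise_cons] at hs
    have hfp : f ≤ p.2 := hf p (List.mem_cons_self ..)
    rw [List.foldl_cons]
    by_cases hq : p.2 = f
    · subst hq
      have hstep : (match (acc ++ [(p.2, g)]).getLast? with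
          | some lastg =>
              if lastg.1 == p.2 then (acc ++ [(p.2, g)]).dropLast ++ [(lastg.1, lastg.2 ++ [p.1])]
              else (acc ++ [(p.2, g)]) ++ [(p.2, [p.1])]
          | none => [(p.2, [p.1])]) = acc ++ [(p.2, g ++ [p.1])] := by
        simp
      rw [hstep, ih acc p.2 (g ++ [p.1]) hs.2 (fun z hz => hs.1 z hz)]
      have hset : ((PySem.Set.ofList ((p :: t).map (fun p => p.2))).filter
            (fun q => !(q == p.2)))
          = (PySem.Set.ofList (t.map (fun p => p.2))).filter (fun q => !(q == p.2)) := by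
        rw [List.map_cons, PySem.Set.ofList_cons]
        simp [PySem.Set.discard, List.filter_filter]
      rw [hset]
      have hmap : ((PySem.Set.ofList (t.map (fun p => p.2))).filter
            (fun q => !(q == p.2))).map (pvCanon t)
          = ((PySem.Set.ofList (t.map (fun p => p.2))).filter
            (fun q => !(q == p.2))).map (pvCanon (p :: t)) := by
        refine List.map_congr_left (fun q hq => ?_)
        have hqne : ¬(p.2 == q) := by
          have := List.of_mem_filter hq
          simp only [Bool.not_eq_true'] at this
          simp [beq_iff_eq] at this ⊢
          exact fun hh => this hh.symm
        simp [pvCanon, hqne]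
      rw [hmap]
      simp
    · have hq' : (f == p.2) = false := by simp [Ne.symm hq]
      have hstep : (match (acc ++ [(f, g)]).getLast? with
          | some lastg =>
              if lastg.1 == p.2 then (acc ++ [(f, g)]).dropLast ++ [(lastg.1, lastg.2 ++ [p.1])]
              else (acc ++ [(f, g)]) ++ [(p.2, [p.1])]
          | none => [(p.2, [p.1])]) = (acc ++ [(f, g)]) ++ [(p.2, [p.1])] := by
        simp [hq']
      rw [hstep, ih (acc ++ [(f, g)]) p.2 [p.1] hs.2 (fun z hz => hs.1 z hz)]
      have hflt : f < p.2 := lt_of_le_of_ne hfp (Ne.symm hq)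
      have htgt : ∀ z ∈ t, f < z.2 := fun z hz => lt_of_lt_of_le hflt (hs.1 z hz)
      have hniln : ((p :: t).filter (fun p => p.2 == f)) = [] := by
        rw [List.filter_eq_nil_iff]
        intro z hz
        rcases List.mem_cons.mp hz with hz | hz
        · simp [hz, hq]
        · simp [ne_of_gt (htgt z hz)]
      have hset : ((PySem.Set.ofList ((p :: t).map (fun p => p.2))).filter (fun q => !(q == f)))
          = p.2 :: (PySem.Set.ofList (t.map (fun p => p.2))).filter (fun q => !(q == p.2)) := by
        rw [List.map_cons, PySem.Set.ofList_cons]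
        rw [List.filter_cons]
        have hp2 : (!(p.2 == f)) = true := by simp [hq]
        rw [if_pos hp2]
        congr 1
        simp only [PySem.Set.discard, List.filter_filter]
        refine List.filter_congr (fun q hq2 => ?_)
        have : q ∈ t.map (fun p => p.2) := (PySem.Set.mem_ofList _ _).mp hq2
        rcases List.mem_map.mp this with ⟨z, hz, hzq⟩
        have : f < q := hzq ▸ htgt z hz
        simp [ne_of_gt this]
      rw [hset]
      have hmap : ((PySem.Set.ofList (t.map (fun p => p.2))).filter
            (fun q => !(q == p.2))).map (pvCanon t)
          = ((PySem.Set.ofList (t.map (fun p => p.2))).filter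
            (fun q => !(q == p.2))).map (pvCanon (p :: t)) := by
        refine List.map_congr_left (fun q hq2 => ?_)
        have hqne : ¬(p.2 == q) := by
          have := List.of_mem_filter hq2
          simp only [Bool.not_eq_true'] at this
          simp [beq_iff_eq] at this ⊢
          exact fun hh => this hh.symm
        simp [pvCanon, hqne]
      rw [hmap]
      simp [hniln, pvCanon]

theorem pvGroup_result (l : List (Int × Int)) (hs : l.Pairwise (fun a b => a.2 ≤ b.2)) :
    l.foldl (fun acc p =>
      match acc.getLast? with
      | some lastg =>
          if lastg.1 == p.2 then acc.dropLast ++ [(lastg.1, lastg.2 ++ [p.1])]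
          else acc ++ [(p.2, [p.1])]
      | none => [(p.2, [p.1])]) []
    = (PySem.Set.ofList (l.map (fun p => p.2))).map (pvCanon l) := by
  cases l with
  | nil => simp [PySem.Set.ofList_nil]
  | cons p t =>
    rw [List.pairwise_cons] at hs
    rw [List.foldl_cons]
    have hstep : (match ([] : List (Int × List Int)).getLast? with
        | some lastg =>
            if lastg.1 == p.2 then ([] : List (Int × List Int)).dropLast ++ [(lastg.1, lastg.2 ++ [p.1])]
            else [] ++ [(p.2, [p.1])]
        | none => [(p.2, [p.1])]) = ([] : List (Int × List Int)) ++ [(p.2, [p.1])] := by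
      simp
    rw [hstep, pvGroup_loop t [] p.2 [p.1] hs.2 (fun z hz => hs.1 z hz)]
    have hset : (PySem.Set.ofList ((p :: t).map (fun p => p.2)))
        = p.2 :: (PySem.Set.ofList (t.map (fun p => p.2))).filter (fun q => !(q == p.2)) := by
      rw [List.map_cons, PySem.Set.ofList_cons]
      simp [PySem.Set.discard]
    rw [hset, List.map_cons]
    have hmap : ((PySem.Set.ofList (t.map (fun p => p.2))).filter
          (fun q => !(q == p.2))).map (pvCanon t)
        = ((PySem.Set.ofList (t.map (fun p => p.2))).filter
          (fun q => !(q == p.2))).map (pvCanon (p :: t)) := by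
      refine List.map_congr_left (fun q hq2 => ?_)
      have hqne : ¬(p.2 == q) := by
        have := List.of_mem_filter hq2
        simp only [Bool.not_eq_true'] at this
        simp [beq_iff_eq] at this ⊢
        exact fun hh => this hh.symm
      simp [pvCanon, hqne]
    rw [← hmap]
    simp [pvCanon]

theorem pvOfList_sublist (l : List Int) : (PySem.Set.ofList l).Sublist l := by
  induction l with
  | nil => simp [PySem.Set.ofList_nil]
  | cons x xs ih =>
    rw [PySem.Set.ofList_cons]
    have h1 : ((PySem.Set.ofList xs).discard x).Sublist (PySem.Set.ofList xs) :=
      List.filter_sublist (l := PySem.Set.ofList xs) (p := fun y => !(y == x))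
    exact List.Sublist.cons₂ x (h1.trans ih)

-- ===== VERDICT (by name: the statement is the Claim_ definition above) =====
theorem get_sorted_frequencies_by_frequency_spec : Claim_equal_get_sorted_frequencies_by_frequency := by
  intro freqs _
  unfold Spec_get_sorted_frequencies_by_frequency
  show get_sorted_frequencies_by_frequency freqs = get_sorted_frequencies_by_frequency_alt freqs
  simp only [get_sorted_frequencies_by_frequency, get_sorted_frequencies_by_frequency_alt]
  rw [pvA_items]
  have hsspw : (PySem.List.sorted (PySem.Dict.ofList freqs).items (fun kv => kv.2)).Pairwise
      (fun a b => a.2 ≤ b.2) :=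
    PySem.List.sorted_pairwise (PySem.Dict.ofList freqs).items (fun kv => kv.2)
  rw [pvGroup_result _ hsspw]
  have hstab : ∀ q, pvCanon (PySem.List.sorted (PySem.Dict.ofList freqs).items (fun kv => kv.2)) q
      = pvCanon (PySem.Dict.ofList freqs).items q := by
    intro q
    simp [pvCanon, pvSorted_stable (PySem.Dict.ofList freqs).items q]
  rw [List.map_congr_left (fun q _ => hstab q)]
  have hperm1 : (PySem.List.sorted (PySem.Dict.ofList freqs).items (fun kv => kv.2)).Perm
      (PySem.Dict.ofList freqs).items :=
    PySem.List.sorted_perm (PySem.Dict.ofList freqs).items (fun kv => kv.2) false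
  have hperm2 : (PySem.Set.ofList ((PySem.List.sorted (PySem.Dict.ofList freqs).items
        (fun kv => kv.2)).map (fun p => p.2))).Perm
      (PySem.Set.ofList ((PySem.Dict.ofList freqs).items.map (fun p => p.2))) := by
    rw [List.perm_ext_iff_of_nodup (PySem.Set.nodup_ofList _) (PySem.Set.nodup_ofList _)]
    intro a
    rw [PySem.Set.mem_ofList, PySem.Set.mem_ofList]
    exact (hperm1.map (fun p => p.2)).mem_iff
  have hpw : (PySem.Set.ofList ((PySem.List.sorted (PySem.Dict.ofList freqs).items
      (fun kv => kv.2)).map (fun p => p.2))).Pairwise (· < ·) := by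
    have h1 : ((PySem.List.sorted (PySem.Dict.ofList freqs).items (fun kv => kv.2)).map
        (fun p => p.2)).Pairwise (· ≤ ·) := List.pairwise_map.mpr hsspw
    have h2 := h1.sublist (pvOfList_sublist _)
    have h3 : (PySem.Set.ofList ((PySem.List.sorted (PySem.Dict.ofList freqs).items
        (fun kv => kv.2)).map (fun p => p.2))).Pairwise (· ≠ ·) := PySem.Set.nodup_ofList _
    exact (h2.and h3).imp (fun hab => lt_of_le_of_ne hab.1 hab.2)
  exact PySem.List.sorted_eq_of_perm_of_pairwise_lt
    ((PySem.Set.ofList ((PySem.Dict.ofList freqs).items.map (fun p => p.2))).map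
      (pvCanon (PySem.Dict.ofList freqs).items))
    ((PySem.Set.ofList ((PySem.List.sorted (PySem.Dict.ofList freqs).items
      (fun kv => kv.2)).map (fun p => p.2))).map (pvCanon (PySem.Dict.ofList freqs).items))
    (fun it => it.1)
    (hperm2.map (pvCanon (PySem.Dict.ofList freqs).items))
    (List.pairwise_map.mpr (hpw.imp (fun hab => by simpa [pvCanon] using hab)))
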